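-- pv_equiv track=rewrite | github.com/jz4o/codingames | python3/practice/classic_puzzle/medium/tree-recognition.py | get_node_shape
-- ===== SOURCE A (Python) =====
-- def get_node_shape(node):
--     branches = [node]
--
--     step = 1
--     while max(len(branch) for branch in branches) > step:
--         next_branches = []
--         for branch in branches:
--             prefix = branch[:step]
--             if len(branch) < step:
--                 next_branches.append(prefix)
--                 next_branches.append(prefix)
--                 continue
--
--             target_value = branch[step - 1]
--             smaller = [value for value in branch[step:] if value < target_value]
--             bigger = [value for value in branch[step:] if value > target_value]
--
--             next_branches.append(prefix + smaller)
--             next_branches.append(prefix + bigger)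
--         branches = next_branches
--
--         step += 1
--
--     return ','.join(str(len(branch)) for branch in branches)
-- ===== SOURCE B (Python) =====
-- def _depth(branch, step):
--     if len(branch) <= step:
--         return step
--     prefix = branch[:step]
--     pivot = branch[step - 1]
--     smaller = [v for v in branch[step:] if v < pivot]
--     bigger = [v for v in branch[step:] if v > pivot]
--     return max(_depth(prefix + smaller, step + 1),
--                _depth(prefix + bigger, step + 1))
--
--
-- def _expand(branch, step, remaining):
--     if remaining == 0:
--         return [len(branch)]
--     if len(branch) <= step:
--         half = _expand(branch, step + 1, remaining - 1)
--         return half + half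
--     prefix = branch[:step]
--     pivot = branch[step - 1]
--     smaller = [v for v in branch[step:] if v < pivot]
--     bigger = [v for v in branch[step:] if v > pivot]
--     return (_expand(prefix + smaller, step + 1, remaining - 1)
--             + _expand(prefix + bigger, step + 1, remaining - 1))
--
--
-- def get_node_shape(node):
--     depth = _depth(node, 1)
--     return ','.join(str(n) for n in _expand(node, 1, depth - 1))
-- ===== Notes on version B (the rewrite author's own statement) =====
-- stated objective: alternative
-- what changed: Replaces A's iterative BFS that rebuilds the whole list of branches level by level with a recursive solution: first compute the tree depth by a recursive helper, then a DFS recursion that expands each branch to that fixed depth and emits the leaf lengths directly.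
import Mathlib
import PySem

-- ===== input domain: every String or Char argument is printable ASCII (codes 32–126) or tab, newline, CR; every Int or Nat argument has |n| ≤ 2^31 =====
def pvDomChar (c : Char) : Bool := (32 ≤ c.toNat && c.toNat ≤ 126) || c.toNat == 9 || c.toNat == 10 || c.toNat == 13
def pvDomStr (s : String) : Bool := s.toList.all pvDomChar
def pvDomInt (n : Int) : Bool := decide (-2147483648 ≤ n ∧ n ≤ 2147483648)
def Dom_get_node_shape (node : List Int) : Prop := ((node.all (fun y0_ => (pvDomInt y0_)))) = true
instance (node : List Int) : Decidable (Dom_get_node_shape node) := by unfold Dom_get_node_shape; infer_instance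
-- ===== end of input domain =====

-- B replaces A's iterative level-by-level BFS with a recursive depth computation plus a
-- depth-bounded DFS recursion emitting the leaf lengths directly (objective: alternative).

-- ===== PORT A =====
-- one iteration of A's inner for-loop body for one branch: the two appended children
def pvChildrenA (branch : List Int) (step : Nat) : List (List Int) :=
  let pre := branch.take step          -- branch[:step], exact since step ≥ 0
  if branch.length < step then [pre, pre]
  else
    -- branch[step-1]: in every call of the loop 1 ≤ step ≤ len(branch) here, so the
    -- index is in range and getD is exact
    let target := branch.getD (step - 1) 0
    let smaller := (branch.drop step).filter (fun v => v < target)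
    let bigger := (branch.drop step).filter (fun v => target < v)
    [pre ++ smaller, pre ++ bigger]

-- max(len(branch) for branch in branches): branches is always nonempty and lengths are ≥ 0,
-- so the fold from 0 is exact
def pvMaxLen (bs : List (List Int)) : Nat := bs.foldl (fun m b => max m b.length) 0

-- termination facts for the ports (cited by the decreasing_by clauses below)
theorem pvPartB_length_le (branch : List Int) (step : Nat) (p : Int → Bool)
    (h : step ≤ branch.length) :
    (branch.take step ++ (branch.drop step).filter p).length ≤ branch.length := by
  have := List.length_filter_le p (branch.drop step)
  simp only [List.length_append, List.length_take, List.length_drop] at *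
  omega

theorem pvChildrenA_length_le (branch : List Int) (step : Nat) :
    ∀ c ∈ pvChildrenA branch step, c.length ≤ branch.length := by
  intro c hc
  unfold pvChildrenA at hc
  by_cases h : branch.length < step
  · simp only [h, if_pos, List.mem_cons, List.not_mem_nil, or_false] at hc
    rcases hc with rfl | rfl <;> (simp only [List.length_take]; omega)
  · simp only [h, if_neg, not_false_iff, List.mem_cons, List.not_mem_nil, or_false] at hc
    rcases hc with rfl | rfl <;> exact pvPartB_length_le branch step _ (by omega)

theorem pvFoldlMax_le {α : Type} (f : α → Nat) (bs : List α) :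
    ∀ (a s : Nat), (bs.foldl (fun m b => max m (f b)) a ≤ s ↔ a ≤ s ∧ ∀ b ∈ bs, f b ≤ s) := by
  induction bs with
  | nil => simp
  | cons x t ih =>
      intro a s
      simp only [List.foldl_cons, ih, Nat.max_le, List.mem_cons, forall_eq_or_imp]
      tauto

theorem pvFlatMap_attach {α β : Type} (l : List α) (f : α → List β) :
    List.flatMap (fun x : {y // y ∈ l} => f x.1) l.attach = l.flatMap f := by
  induction l with
  | nil => simp
  | cons x t ih => simp_all [List.attach_cons, List.flatMap_map]

theorem pvMaxLen_flatMap_le (bs : List (List Int)) (s : Nat) :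
    pvMaxLen (bs.flatMap (fun b => pvChildrenA b s)) ≤ pvMaxLen bs := by
  unfold pvMaxLen
  rw [pvFoldlMax_le]
  refine ⟨Nat.zero_le _, fun c hc => ?_⟩
  rcases List.mem_flatMap.mp hc with ⟨b, hb, hcb⟩
  have h1 := pvChildrenA_length_le b s c hcb
  have h2 : b.length ≤ bs.foldl (fun m b => max m b.length) 0 :=
    ((pvFoldlMax_le (fun b : List Int => b.length) bs 0 _).mp le_rfl).2 b hb
  omega

-- A's while loop; state = (branches, step)
def pvLoopA (branches : List (List Int)) (step : Nat) : List (List Int) :=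
  if pvMaxLen branches > step then
    pvLoopA (branches.flatMap (fun b => pvChildrenA b step)) (step + 1)
  else branches
termination_by pvMaxLen branches - step
decreasing_by
  have e := pvFlatMap_attach branches (fun b => pvChildrenA b step)
  rw [e]
  have := pvMaxLen_flatMap_le branches step
  omega

def get_node_shape (node : List Int) : String :=
  PySem.Str.join "," ((pvLoopA [node] 1).map (fun b => PySem.Int.toStr (b.length : Int)))

-- ===== PORT B =====
def pvDepthB (branch : List Int) (step : Nat) : Nat :=
  if branch.length ≤ step then step
  else
    let pre := branch.take step
    let pivot := branch.getD (step - 1) 0   -- in range: 1 ≤ step < len(branch)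
    let smaller := (branch.drop step).filter (fun v => v < pivot)
    let bigger := (branch.drop step).filter (fun v => pivot < v)
    max (pvDepthB (pre ++ smaller) (step + 1)) (pvDepthB (pre ++ bigger) (step + 1))
termination_by branch.length - step
decreasing_by
  · have := pvPartB_length_le branch step (fun v => decide (v < branch.getD (step - 1) 0)) (by omega)
    omega
  · have := pvPartB_length_le branch step (fun v => decide (branch.getD (step - 1) 0 < v)) (by omega)
    omega

def pvExpandB (branch : List Int) (step : Nat) (remaining : Nat) : List Nat :=
  match remaining with
  | 0 => [branch.length]
  | r + 1 =>
    if branch.length ≤ step then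
      let half := pvExpandB branch (step + 1) r
      half ++ half
    else
      let pre := branch.take step
      let pivot := branch.getD (step - 1) 0   -- in range: 1 ≤ step < len(branch)
      let smaller := (branch.drop step).filter (fun v => v < pivot)
      let bigger := (branch.drop step).filter (fun v => pivot < v)
      pvExpandB (pre ++ smaller) (step + 1) r ++ pvExpandB (pre ++ bigger) (step + 1) r

def get_node_shape_alt (node : List Int) : String :=
  PySem.Str.join ","
    ((pvExpandB node 1 (pvDepthB node 1 - 1)).map (fun n : Nat => PySem.Int.toStr (n : Int)))

-- ===== PRECONDITION & SPEC =====
def Spec_get_node_shape (node : List Int) (out : String) : Prop := out = get_node_shape_alt node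
instance (node : List Int) (out : String) : Decidable (Spec_get_node_shape node out) := by unfold Spec_get_node_shape; infer_instance

-- ===== CLAIM (what is proved, stated in full; the proofs are below) =====
def Claim_equal_get_node_shape : Prop := ∀ (node : List Int), Dom_get_node_shape node → Spec_get_node_shape node (get_node_shape node)

-- ===== LEMMAS AND PROOFS =====

-- the two children of a branch, abstractly
def pvL (b : List Int) (s : Nat) : List Int :=
  b.take s ++ (b.drop s).filter (fun v => v < b.getD (s - 1) 0)
def pvR (b : List Int) (s : Nat) : List Int :=
  b.take s ++ (b.drop s).filter (fun v => b.getD (s - 1) 0 < v)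

theorem pvChildrenA_eq (b : List Int) (s : Nat) :
    pvChildrenA b s = if b.length ≤ s then [b, b] else [pvL b s, pvR b s] := by
  simp only [pvChildrenA, pvL, pvR]
  by_cases h1 : b.length < s
  · simp [h1, List.take_of_length_le (le_of_lt h1), show b.length ≤ s by omega]
  · by_cases h2 : b.length ≤ s
    · have he : b.length = s := by omega
      simp [h1, h2, List.take_of_length_le h2, List.drop_eq_nil_of_le (le_of_eq he)]
    · simp [h1, h2]

theorem pvDepthB_le (b : List Int) (s : Nat) (h : b.length ≤ s) : pvDepthB b s = s := by
  rw [pvDepthB]; simp [h]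

theorem pvDepthB_long (b : List Int) (s : Nat) (h : ¬ b.length ≤ s) :
    pvDepthB b s = max (pvDepthB (pvL b s) (s + 1)) (pvDepthB (pvR b s) (s + 1)) := by
  rw [pvDepthB]; simp [h, pvL, pvR]

theorem pvL_length_le (b : List Int) (s : Nat) (h : s ≤ b.length) : (pvL b s).length ≤ b.length :=
  pvPartB_length_le b s _ h

theorem pvDepthB_ge_aux (k : Nat) :
    ∀ (b : List Int) (s : Nat), b.length - s ≤ k → s ≤ pvDepthB b s := by
  induction k with
  | zero =>
      intro b s h
      rw [pvDepthB_le b s (by omega)]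
  | succ k ih =>
      intro b s h
      by_cases hls : b.length ≤ s
      · rw [pvDepthB_le b s hls]
      · rw [pvDepthB_long b s hls]
        have hL := pvL_length_le b s (by omega)
        have := ih (pvL b s) (s + 1) (by omega)
        omega

theorem pvDepthB_ge (b : List Int) (s : Nat) : s ≤ pvDepthB b s :=
  pvDepthB_ge_aux (b.length - s) b s le_rfl

theorem pvExpandB_succ (b : List Int) (s n : Nat) :
    pvExpandB b s (n + 1) =
      if b.length ≤ s then pvExpandB b (s + 1) n ++ pvExpandB b (s + 1) n
      else pvExpandB (pvL b s) (s + 1) n ++ pvExpandB (pvR b s) (s + 1) n := by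
  rw [pvExpandB]
  by_cases h : b.length ≤ s <;> simp [h, pvL, pvR]

-- max of the depths of the branches at step s (with floor s)
def pvS (bs : List (List Int)) (s : Nat) : Nat :=
  bs.foldl (fun m b => max m (pvDepthB b s)) s

theorem pvGuard_iff (bs : List (List Int)) (s : Nat) :
    pvMaxLen bs ≤ s ↔ pvS bs s ≤ s := by
  unfold pvMaxLen pvS
  rw [pvFoldlMax_le (fun b : List Int => b.length) bs 0 s,
      pvFoldlMax_le (fun b : List Int => pvDepthB b s) bs s s]
  constructor
  · rintro ⟨-, h⟩
    exact ⟨le_rfl, fun b hb => le_of_eq (pvDepthB_le b s (h b hb))⟩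
  · rintro ⟨-, h⟩
    refine ⟨Nat.zero_le _, fun b hb => ?_⟩
    by_contra hlen
    have hd := pvDepthB_long b s (by omega)
    have h1 := pvDepthB_ge (pvL b s) (s + 1)
    have := h b hb
    omega

theorem pvS_step_aux (bs : List (List Int)) (s : Nat) :
    ∀ a : Nat,
      (bs.flatMap (fun b => pvChildrenA b s)).foldl (fun m c => max m (pvDepthB c (s + 1)))
        (max (s + 1) a)
      = max (s + 1) (bs.foldl (fun m b => max m (pvDepthB b s)) a) := by
  induction bs with
  | nil => intro a; simp
  | cons b t ih =>
      intro a
      rw [List.flatMap_cons, List.foldl_append, List.foldl_cons, pvChildrenA_eq]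
      by_cases h : b.length ≤ s
      · have hd : pvDepthB b s = s := pvDepthB_le b s h
        have hd1 : pvDepthB b (s + 1) = s + 1 := pvDepthB_le b (s + 1) (by omega)
        simp only [h, if_pos, List.foldl_cons, List.foldl_nil, hd, hd1]
        rw [show max (max (max (s + 1) a) (s + 1)) (s + 1) = max (s + 1) (max a s) by omega]
        exact ih _
      · have hd := pvDepthB_long b s h
        have h1 := pvDepthB_ge (pvL b s) (s + 1)
        have h2 := pvDepthB_ge (pvR b s) (s + 1)
        simp only [h, if_neg, not_false_iff, List.foldl_cons, List.foldl_nil, hd]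
        rw [show max (max (max (s + 1) a) (pvDepthB (pvL b s) (s + 1))) (pvDepthB (pvR b s) (s + 1))
              = max (s + 1) (max a (max (pvDepthB (pvL b s) (s + 1)) (pvDepthB (pvR b s) (s + 1))))
            by omega]
        exact ih _

theorem pvS_step (bs : List (List Int)) (s : Nat) :
    pvS (bs.flatMap (fun b => pvChildrenA b s)) (s + 1) = max (s + 1) (pvS bs s) := by
  unfold pvS
  have h := pvS_step_aux bs s s
  rwa [show max (s + 1) s = s + 1 by omega] at h

theorem pvChildren_expand (b : List Int) (s n : Nat) :
    (pvChildrenA b s).flatMap (fun c => pvExpandB c (s + 1) n) = pvExpandB b s (n + 1) := by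
  rw [pvChildrenA_eq, pvExpandB_succ]
  by_cases h : b.length ≤ s <;> simp [h]

theorem pvFlatMap_len_singleton (bs : List (List Int)) (s : Nat) :
    bs.flatMap (fun b => pvExpandB b s 0) = bs.map List.length := by
  induction bs with
  | nil => rfl
  | cons b t ih => rw [List.flatMap_cons, ih]; rfl

theorem pvLoop_expand (n : Nat) :
    ∀ (bs : List (List Int)) (s : Nat), pvS bs s = s + n →
      (pvLoopA bs s).map List.length = bs.flatMap (fun b => pvExpandB b s n) := by
  induction n with
  | zero =>
      intro bs s hS
      have hg : ¬ pvMaxLen bs > s := by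
        have := (pvGuard_iff bs s).mpr (le_of_eq hS); omega
      rw [pvLoopA.eq_def]
      simp only [hg, if_neg, not_false_iff]
      exact (pvFlatMap_len_singleton bs s).symm
  | succ n ih =>
      intro bs s hS
      have hg : pvMaxLen bs > s := by
        by_contra hc
        have := (pvGuard_iff bs s).mp (by omega)
        omega
      rw [pvLoopA.eq_def]
      simp only [hg, if_pos]
      have hS' : pvS (bs.flatMap (fun b => pvChildrenA b s)) (s + 1) = (s + 1) + n := by
        rw [pvS_step, hS]; omega
      rw [ih _ _ hS', List.flatMap_assoc]
      exact List.flatMap_congr (fun b _ => pvChildren_expand b s n)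

theorem pvMain (node : List Int) : get_node_shape node = get_node_shape_alt node := by
  unfold get_node_shape get_node_shape_alt
  have hge := pvDepthB_ge node 1
  have hS : pvS [node] 1 = 1 + (pvDepthB node 1 - 1) := by
    unfold pvS
    simp only [List.foldl_cons, List.foldl_nil]
    omega
  have h := pvLoop_expand (pvDepthB node 1 - 1) [node] 1 hS
  have hmm : (pvLoopA [node] 1).map (fun b => PySem.Int.toStr (b.length : Int))
      = ((pvLoopA [node] 1).map List.length).map (fun n : Nat => PySem.Int.toStr (n : Int)) := by
    rw [List.map_map]
    simp [Function.comp]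
  rw [hmm, h]
  simp

-- ===== VERDICT (by name: the statement is the Claim_ definition above) =====
theorem get_node_shape_spec : Claim_equal_get_node_shape := by
  intro node _
  unfold Spec_get_node_shape
  exact pvMain node
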